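-- pv_equiv track=rewrite | github.com/MaitryG/DSA_Algorithms | key_cases.py | solution
-- ===== SOURCE A (Python) =====
-- import bisect
--
-- def solution(objects, radius):
--     max_count = 0
--     best_coordinate = None
--     n = len(objects)
--     sorted_objects = sorted(objects)
--
--     for obj in sorted_objects:
--         for c in [obj - radius, obj, obj + radius]:
--             start = c - radius
--             end = c + radius
--
--             left = bisect.bisect_left(sorted_objects, start)
--             right = bisect.bisect_right(sorted_objects, end)
--
--             count = right - left
--
--             if count > max_count:
--                 max_count = count
--                 best_coordinate = c
--             elif count == max_count:
--                 best_coordinate = min(best_coordinate, c)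
--     return best_coordinate
-- ===== SOURCE B (Python) =====
-- def solution(objects, radius):
--     if not objects:
--         return None
--     s = sorted(objects)
--     n = len(s)
--     cands = sorted(o + d for o in objects for d in (-radius, 0, radius))
--     lo = hi = 0
--     best_count = 0
--     best = None
--     for c in cands:
--         while lo < n and s[lo] < c - radius:
--             lo += 1
--         while hi < n and s[hi] <= c + radius:
--             hi += 1
--         count = hi - lo
--         if count > best_count:
--             best_count = count
--             best = c
--     return best
-- ===== Notes on version B (the rewrite author's own statement) =====
-- stated objective: alternative
-- what changed: B replaces A's per-candidate bisect lookups and min-tie bookkeeping with a single left-to-right sweep over the globally sorted candidate list using two monotone pointers into the sorted objects (count = hi - lo), so the first candidate reaching the maximal count is automatically the smallest coordinate.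
import Mathlib
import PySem

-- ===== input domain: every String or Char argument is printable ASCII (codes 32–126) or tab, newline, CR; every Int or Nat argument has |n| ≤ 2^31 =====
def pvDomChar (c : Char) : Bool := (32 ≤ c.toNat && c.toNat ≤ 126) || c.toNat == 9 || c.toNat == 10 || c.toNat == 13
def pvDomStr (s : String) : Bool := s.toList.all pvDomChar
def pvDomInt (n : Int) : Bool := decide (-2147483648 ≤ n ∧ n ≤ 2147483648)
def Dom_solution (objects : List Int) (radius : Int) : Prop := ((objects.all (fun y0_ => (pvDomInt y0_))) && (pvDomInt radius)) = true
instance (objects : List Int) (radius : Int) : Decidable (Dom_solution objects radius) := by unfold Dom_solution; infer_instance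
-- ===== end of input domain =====

-- B replaces A's per-candidate bisect lookups and min-tie bookkeeping with one sweep over the
-- sorted candidate list using two monotone pointers into the sorted objects; same cost class.

-- ===== PORT A =====
-- bisect.bisect_left / bisect.bisect_right are PySem.List.bisectLeft / bisectRight.
def solution (objects : List Int) (radius : Int) : Option Int :=
  let _n := PySem.List.len objects   -- Python's unused `n = len(objects)`
  let sortedObjects := PySem.List.sorted objects (fun x => x) false
  (sortedObjects.foldl (fun acc obj =>
      [obj - radius, obj, obj + radius].foldl (fun acc c =>
        let start := c - radius
        let end_ := c + radius
        let left := PySem.List.bisectLeft sortedObjects start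
        let right := PySem.List.bisectRight sortedObjects end_
        let count : Int := (right : Int) - (left : Int)
        if count > acc.1 then (count, some c)
        else if count = acc.1 then
          -- Python's min(best_coordinate, c) raises TypeError when best_coordinate is None;
          -- Pre_solution excludes exactly those inputs, so the `none` case here is arbitrary.
          (acc.1, some (match acc.2 with | none => c | some b => min b c))
        else acc) acc)
    ((0 : Int), (none : Option Int))).2

-- ===== PORT B =====
-- `while lo < n and s[lo] < key: lo += 1` (fuel-based so the kernel can reduce it;
-- the fuel s.length - lo can never run out before the loop condition fails)
def advLoAux (s : List Int) (key : Int) : Nat → Nat → Nat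
  | 0, lo => lo
  | fuel + 1, lo =>
    if h : lo < s.length then
      if s[lo] < key then advLoAux s key fuel (lo + 1) else lo
    else lo

def advanceLo (s : List Int) (key : Int) (lo : Nat) : Nat :=
  advLoAux s key (s.length - lo) lo

-- `while hi < n and s[hi] <= key: hi += 1`
def advHiAux (s : List Int) (key : Int) : Nat → Nat → Nat
  | 0, hi => hi
  | fuel + 1, hi =>
    if h : hi < s.length then
      if s[hi] ≤ key then advHiAux s key fuel (hi + 1) else hi
    else hi

def advanceHi (s : List Int) (key : Int) (hi : Nat) : Nat :=
  advHiAux s key (s.length - hi) hi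

def solution_alt (objects : List Int) (radius : Int) : Option Int :=
  match objects with
  | [] => none
  | _ :: _ =>
    let s := PySem.List.sorted objects (fun x => x) false
    let cands := PySem.List.sorted (objects.flatMap (fun o => [o - radius, o, o + radius]))
                   (fun x => x) false
    (cands.foldl (fun st c =>
        let lo := advanceLo s (c - radius) st.1.1
        let hi := advanceHi s (c + radius) st.1.2
        let count : Int := (hi : Int) - (lo : Int)
        ((lo, hi), if count > st.2.1 then (count, some c) else st.2))
      ((0, 0), ((0 : Int), (none : Option Int)))).2.2

-- ===== PRECONDITION & SPEC =====
-- Pre_ excludes exactly the inputs on which A raises TypeError: a nonempty objects list with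
-- radius < 0 always reaches min(None, c) because every window [c-radius, c+radius] is empty.
def Pre_solution (objects : List Int) (radius : Int) : Prop := objects = [] ∨ 0 ≤ radius
instance (objects : List Int) (radius : Int) : Decidable (Pre_solution objects radius) := by
  unfold Pre_solution; infer_instance
def pvWitness_solution : List Int × Int := ([0, 3, 5], 2)

def Spec_solution (objects : List Int) (radius : Int) (out : Option Int) : Prop :=
  out = solution_alt objects radius
instance (objects : List Int) (radius : Int) (out : Option Int) :
    Decidable (Spec_solution objects radius out) := by unfold Spec_solution; infer_instance

-- ===== CLAIM (what is proved, stated in full; the proofs are below) =====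
def Claim_equal_solution : Prop := ∀ (objects : List Int) (radius : Int),
  Dom_solution objects radius → Pre_solution objects radius →
  Spec_solution objects radius (solution objects radius)

-- ===== LEMMAS AND PROOFS =====

-- the count both programs attach to a candidate c (A computes it by bisect; B by the two pointers)
def cnt (s : List Int) (radius c : Int) : Int :=
  ((PySem.List.bisectRight s (c + radius) : Nat) : Int)
    - ((PySem.List.bisectLeft s (c - radius) : Nat) : Int)

-- A's loop body on the (best_count, best_coordinate) accumulator
def stepA (s : List Int) (radius : Int) (acc : Int × Option Int) (c : Int) : Int × Option Int :=
  if cnt s radius c > acc.1 then (cnt s radius c, some c)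
  else if cnt s radius c = acc.1 then
    (acc.1, some (match acc.2 with | none => c | some b => min b c))
  else acc

-- B's loop body stripped of the pointers
def stepP (s : List Int) (radius : Int) (acc : Int × Option Int) (c : Int) : Int × Option Int :=
  if cnt s radius c > acc.1 then (cnt s radius c, some c) else acc

-- running maximum of the counts
def Mx (s : List Int) (radius : Int) (cs : List Int) : Int :=
  cs.foldl (fun a c => max a (cnt s radius c)) 0

lemma advLoAux_eq (s : List Int) (key : Int) (hpw : s.Pairwise (· ≤ ·)) :
    ∀ (fuel lo : Nat), s.length ≤ fuel + lo → lo ≤ PySem.List.bisectLeft s key →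
    advLoAux s key fuel lo = PySem.List.bisectLeft s key := by
  obtain ⟨hle, hlt, hge⟩ := PySem.List.bisectLeft_spec s key hpw
  intro fuel
  induction fuel with
  | zero => intro lo hf hlo; simp only [advLoAux]; omega
  | succ fuel ih =>
    intro lo hf hlo
    simp only [advLoAux]
    split
    · rename_i h
      split
      · rename_i hx
        have hlt' : lo < PySem.List.bisectLeft s key := by
          by_contra hc
          exact absurd (hge lo h (by omega)) (by omega)
        exact ih (lo + 1) (by omega) (by omega)
      · rename_i hx
        have : PySem.List.bisectLeft s key ≤ lo := by
          by_contra hc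
          exact hx (hlt lo h (by omega))
        omega
    · omega

lemma advanceLo_eq (s : List Int) (key : Int) (lo : Nat)
    (hpw : s.Pairwise (· ≤ ·)) (hlo : lo ≤ PySem.List.bisectLeft s key) :
    advanceLo s key lo = PySem.List.bisectLeft s key := by
  obtain ⟨hle, _, _⟩ := PySem.List.bisectLeft_spec s key hpw
  exact advLoAux_eq s key hpw _ lo (by omega) hlo

lemma advHiAux_eq (s : List Int) (key : Int) (hpw : s.Pairwise (· ≤ ·)) :
    ∀ (fuel hi : Nat), s.length ≤ fuel + hi → hi ≤ PySem.List.bisectRight s key →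
    advHiAux s key fuel hi = PySem.List.bisectRight s key := by
  obtain ⟨hle, hlt, hge⟩ := PySem.List.bisectRight_spec s key hpw
  intro fuel
  induction fuel with
  | zero => intro hi hf hhi; simp only [advHiAux]; omega
  | succ fuel ih =>
    intro hi hf hhi
    simp only [advHiAux]
    split
    · rename_i h
      split
      · rename_i hx
        have hlt' : hi < PySem.List.bisectRight s key := by
          by_contra hc
          exact absurd (hge hi h (by omega)) (by omega)
        exact ih (hi + 1) (by omega) (by omega)
      · rename_i hx
        have : PySem.List.bisectRight s key ≤ hi := by
          by_contra hc
          exact hx (hlt hi h (by omega))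
        omega
    · omega

lemma advanceHi_eq (s : List Int) (key : Int) (hi : Nat)
    (hpw : s.Pairwise (· ≤ ·)) (hhi : hi ≤ PySem.List.bisectRight s key) :
    advanceHi s key hi = PySem.List.bisectRight s key := by
  obtain ⟨hle, _, _⟩ := PySem.List.bisectRight_spec s key hpw
  exact advHiAux_eq s key hpw _ hi (by omega) hhi

lemma bisectLeft_mono (s : List Int) (hpw : s.Pairwise (· ≤ ·)) {x y : Int} (h : x ≤ y) :
    PySem.List.bisectLeft s x ≤ PySem.List.bisectLeft s y := by
  obtain ⟨hle, hlt, hge⟩ := PySem.List.bisectLeft_spec s x hpw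
  obtain ⟨hle', hlt', hge'⟩ := PySem.List.bisectLeft_spec s y hpw
  by_contra hc
  have hj : PySem.List.bisectLeft s y < s.length := by omega
  have h1 := hlt _ hj (by omega)
  have h2 := hge' _ hj (by omega)
  omega

lemma bisectRight_mono (s : List Int) (hpw : s.Pairwise (· ≤ ·)) {x y : Int} (h : x ≤ y) :
    PySem.List.bisectRight s x ≤ PySem.List.bisectRight s y := by
  obtain ⟨hle, hlt, hge⟩ := PySem.List.bisectRight_spec s x hpw
  obtain ⟨hle', hlt', hge'⟩ := PySem.List.bisectRight_spec s y hpw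
  by_contra hc
  have hj : PySem.List.bisectRight s y < s.length := by omega
  have h1 := hlt _ hj (by omega)
  have h2 := hge' _ hj (by omega)
  omega

-- the sweep's (best_count, best) component equals the pure fold over the same candidates
lemma sweep_eq (s : List Int) (radius : Int) (hpw : s.Pairwise (· ≤ ·)) :
    ∀ (cs : List Int), cs.Pairwise (· ≤ ·) →
    ∀ (lo hi : Nat) (acc : Int × Option Int),
      (∀ c ∈ cs, lo ≤ PySem.List.bisectLeft s (c - radius)
               ∧ hi ≤ PySem.List.bisectRight s (c + radius)) →
      (cs.foldl (fun st c =>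
          let lo := advanceLo s (c - radius) st.1.1
          let hi := advanceHi s (c + radius) st.1.2
          let count : Int := (hi : Int) - (lo : Int)
          ((lo, hi), if count > st.2.1 then (count, some c) else st.2))
        ((lo, hi), acc)).2
      = cs.foldl (stepP s radius) acc := by
  intro cs
  induction cs with
  | nil => intro _ lo hi acc _; rfl
  | cons c q ih =>
    intro hcs lo hi acc hbound
    obtain ⟨hc, hq⟩ := List.pairwise_cons.mp hcs
    obtain ⟨hlo, hhi⟩ := hbound c (List.mem_cons_self)
    simp only [List.foldl_cons]
    rw [advanceLo_eq s _ _ hpw hlo, advanceHi_eq s _ _ hpw hhi]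
    have hstep : (if ((PySem.List.bisectRight s (c + radius) : Nat) : Int)
          - ((PySem.List.bisectLeft s (c - radius) : Nat) : Int) > acc.1
        then (((PySem.List.bisectRight s (c + radius) : Nat) : Int)
          - ((PySem.List.bisectLeft s (c - radius) : Nat) : Int), some c) else acc)
        = stepP s radius acc c := by
      simp only [stepP, cnt]
    rw [hstep]
    exact ih hq _ _ _ (fun c' hc' =>
      ⟨bisectLeft_mono s hpw (by have := hc c' hc'; omega),
       bisectRight_mono s hpw (by have := hc c' hc'; omega)⟩)

lemma foldl_maxproj_mem (s : List Int) (radius : Int) :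
    ∀ (cs : List Int) (a : Int),
      cs.foldl (fun x c => max x (cnt s radius c)) a = a
      ∨ ∃ c ∈ cs, cs.foldl (fun x c => max x (cnt s radius c)) a = cnt s radius c := by
  intro cs
  induction cs with
  | nil => intro a; left; rfl
  | cons c q ih =>
    intro a
    simp only [List.foldl_cons]
    rcases ih (max a (cnt s radius c)) with h | ⟨c', hc', h⟩
    · rcases max_choice a (cnt s radius c) with hm | hm
      · left; rw [h, hm]
      · right; exact ⟨c, List.mem_cons_self, by rw [h, hm]⟩
    · right; exact ⟨c', List.mem_cons_of_mem _ hc', h⟩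

lemma mx_attained (s : List Int) (radius : Int) (cs : List Int) (h : 0 < Mx s radius cs) :
    ∃ c ∈ cs, cnt s radius c = Mx s radius cs := by
  rcases foldl_maxproj_mem s radius cs 0 with h0 | ⟨c, hc, hv⟩
  · exfalso
    have hz : Mx s radius cs = 0 := h0
    omega
  · exact ⟨c, hc, hv.symm⟩

lemma charA (s : List Int) (radius : Int) (cs : List Int)
    (h : ∀ c ∈ cs, 1 ≤ cnt s radius c) :
    cs.foldl (stepA s radius) (0, none)
      = (Mx s radius cs, (cs.filter (fun c => cnt s radius c = Mx s radius cs)).min?) := by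
  induction cs using List.reverseRecOn with
  | nil => simp [Mx]
  | append_singleton cs c ih =>
    have hall : ∀ x ∈ cs, 1 ≤ cnt s radius x := fun x hx => h x (by simp [hx])
    have hc : 1 ≤ cnt s radius c := h c (by simp)
    have hub : ∀ x ∈ cs, cnt s radius x ≤ Mx s radius cs := by
      unfold Mx
      exact (PySem.List.le_foldl_max_int cs (fun x => cnt s radius x) 0).2
    have hMx : Mx s radius (cs ++ [c]) = max (Mx s radius cs) (cnt s radius c) := by
      simp [Mx, List.foldl_append]
    rw [List.foldl_append, List.foldl_cons, List.foldl_nil, ih hall]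
    rcases lt_trichotomy (Mx s radius cs) (cnt s radius c) with hlt | heq | hgt
    · have hM' : Mx s radius (cs ++ [c]) = cnt s radius c := by rw [hMx, max_eq_right hlt.le]
      have hstep : stepA s radius
          (Mx s radius cs, (cs.filter (fun x => decide (cnt s radius x = Mx s radius cs))).min?) c
          = (cnt s radius c, some c) := by
        unfold stepA
        rw [if_pos hlt]
      have hnil : cs.filter (fun x => decide (cnt s radius x = cnt s radius c)) = [] := by
        rw [List.filter_eq_nil_iff]
        intro x hx
        have := hub x hx
        simp only [decide_eq_true_eq]
        omega
      rw [hstep, hM', List.filter_append, hnil]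
      simp
    · have hM' : Mx s radius (cs ++ [c]) = Mx s radius cs := by rw [hMx, max_eq_left heq.ge]
      obtain ⟨c0, hc0, hv0⟩ := mx_attained s radius cs (by omega)
      have hmem : c0 ∈ cs.filter (fun x => decide (cnt s radius x = Mx s radius cs)) := by
        simp only [List.mem_filter, decide_eq_true_eq]; exact ⟨hc0, hv0⟩
      obtain ⟨w0, t, hw⟩ := List.exists_cons_of_ne_nil (List.ne_nil_of_mem hmem)
      have hstep : stepA s radius
          (Mx s radius cs, (cs.filter (fun x => decide (cnt s radius x = Mx s radius cs))).min?) c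
          = (Mx s radius cs, some (min (t.foldl min w0) c)) := by
        unfold stepA
        rw [if_neg (by omega), if_pos heq.symm, hw, List.min?_cons']
      have hfilter : (cs ++ [c]).filter (fun x => decide (cnt s radius x = Mx s radius cs))
          = (w0 :: t) ++ [c] := by
        rw [List.filter_append, hw]
        simp [heq.symm]
      rw [hstep, hM', hfilter, List.cons_append, List.min?_cons', List.foldl_append,
        List.foldl_cons, List.foldl_nil]
    · have hM' : Mx s radius (cs ++ [c]) = Mx s radius cs := by rw [hMx, max_eq_left hgt.le]
      have hstep : stepA s radius
          (Mx s radius cs, (cs.filter (fun x => decide (cnt s radius x = Mx s radius cs))).min?) c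
          = (Mx s radius cs, (cs.filter (fun x => decide (cnt s radius x = Mx s radius cs))).min?) := by
        unfold stepA
        rw [if_neg (by omega), if_neg (by omega)]
      have hfilter : (cs ++ [c]).filter (fun x => decide (cnt s radius x = Mx s radius cs))
          = cs.filter (fun x => decide (cnt s radius x = Mx s radius cs)) := by
        rw [List.filter_append]
        simp [show ¬ (cnt s radius c = Mx s radius cs) by omega]
      rw [hstep, hM', hfilter]

lemma charB (s : List Int) (radius : Int) (cs : List Int)
    (h : ∀ c ∈ cs, 1 ≤ cnt s radius c) :
    cs.foldl (stepP s radius) (0, none)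
      = (Mx s radius cs, (cs.filter (fun c => cnt s radius c = Mx s radius cs)).head?) := by
  induction cs using List.reverseRecOn with
  | nil => simp [Mx]
  | append_singleton cs c ih =>
    have hall : ∀ x ∈ cs, 1 ≤ cnt s radius x := fun x hx => h x (by simp [hx])
    have hc : 1 ≤ cnt s radius c := h c (by simp)
    have hub : ∀ x ∈ cs, cnt s radius x ≤ Mx s radius cs := by
      unfold Mx
      exact (PySem.List.le_foldl_max_int cs (fun x => cnt s radius x) 0).2
    have hMx : Mx s radius (cs ++ [c]) = max (Mx s radius cs) (cnt s radius c) := by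
      simp [Mx, List.foldl_append]
    rw [List.foldl_append, List.foldl_cons, List.foldl_nil, ih hall]
    rcases lt_trichotomy (Mx s radius cs) (cnt s radius c) with hlt | heq | hgt
    · have hM' : Mx s radius (cs ++ [c]) = cnt s radius c := by rw [hMx, max_eq_right hlt.le]
      have hstep : stepP s radius
          (Mx s radius cs, (cs.filter (fun x => decide (cnt s radius x = Mx s radius cs))).head?) c
          = (cnt s radius c, some c) := by
        unfold stepP
        rw [if_pos hlt]
      have hnil : cs.filter (fun x => decide (cnt s radius x = cnt s radius c)) = [] := by
        rw [List.filter_eq_nil_iff]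
        intro x hx
        have := hub x hx
        simp only [decide_eq_true_eq]
        omega
      rw [hstep, hM', List.filter_append, hnil]
      simp
    · have hM' : Mx s radius (cs ++ [c]) = Mx s radius cs := by rw [hMx, max_eq_left heq.ge]
      obtain ⟨c0, hc0, hv0⟩ := mx_attained s radius cs (by omega)
      have hmem : c0 ∈ cs.filter (fun x => decide (cnt s radius x = Mx s radius cs)) := by
        simp only [List.mem_filter, decide_eq_true_eq]; exact ⟨hc0, hv0⟩
      obtain ⟨w0, t, hw⟩ := List.exists_cons_of_ne_nil (List.ne_nil_of_mem hmem)
      have hstep : stepP s radius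
          (Mx s radius cs, (cs.filter (fun x => decide (cnt s radius x = Mx s radius cs))).head?) c
          = (Mx s radius cs, (cs.filter (fun x => decide (cnt s radius x = Mx s radius cs))).head?) := by
        unfold stepP
        rw [if_neg (by omega)]
      have hfilter : (cs ++ [c]).filter (fun x => decide (cnt s radius x = Mx s radius cs))
          = (w0 :: t) ++ [c] := by
        rw [List.filter_append, hw]
        simp [heq.symm]
      rw [hstep, hM', hfilter, hw]
      simp
    · have hM' : Mx s radius (cs ++ [c]) = Mx s radius cs := by rw [hMx, max_eq_left hgt.le]
      have hstep : stepP s radius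
          (Mx s radius cs, (cs.filter (fun x => decide (cnt s radius x = Mx s radius cs))).head?) c
          = (Mx s radius cs, (cs.filter (fun x => decide (cnt s radius x = Mx s radius cs))).head?) := by
        unfold stepP
        rw [if_neg (by omega)]
      have hfilter : (cs ++ [c]).filter (fun x => decide (cnt s radius x = Mx s radius cs))
          = cs.filter (fun x => decide (cnt s radius x = Mx s radius cs)) := by
        rw [List.filter_append]
        simp [show ¬ (cnt s radius c = Mx s radius cs) by omega]
      rw [hstep, hM', hfilter]

lemma min?_perm {l l' : List Int} (h : l.Perm l') : l.min? = l'.min? := by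
  cases hm : l.min? with
  | none =>
    rw [List.min?_eq_none_iff] at hm
    subst hm
    rw [eq_comm, List.min?_eq_none_iff]
    exact h.symm.eq_nil
  | some m =>
    rw [List.min?_eq_some_iff] at hm
    rw [eq_comm, List.min?_eq_some_iff]
    exact ⟨h.mem_iff.mp hm.1, fun b hb => hm.2 b (h.mem_iff.mpr hb)⟩

lemma head?_eq_min? {l : List Int} (h : l.Pairwise (· ≤ ·)) : l.head? = l.min? := by
  cases l with
  | nil => rfl
  | cons x t =>
    rw [List.head?_cons, eq_comm, List.min?_eq_some_iff]
    exact ⟨List.mem_cons_self, by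
      intro b hb
      rcases List.mem_cons.mp hb with rfl | hb
      · exact le_refl _
      · exact (List.pairwise_cons.mp h).1 b hb⟩

lemma mx_perm (s : List Int) (radius : Int) {cs cs' : List Int} (h : cs.Perm cs') :
    Mx s radius cs = Mx s radius cs' := by
  haveI : Std.Commutative (fun (x c : Int) => max x c) := ⟨max_comm⟩
  unfold Mx
  haveI : RightCommutative (fun (x : Int) (c : Int) => max x (cnt s radius c)) :=
    ⟨fun a b c => by rw [max_right_comm]⟩
  exact h.foldl_eq 0

lemma cnt_pos (objects : List Int) (radius : Int) (hr : 0 ≤ radius)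
    (c : Int) (hc : c ∈ objects.flatMap (fun o => [o - radius, o, o + radius])) :
    1 ≤ cnt (PySem.List.sorted objects (fun x => x) false) radius c := by
  set s := PySem.List.sorted objects (fun x => x) false with hs
  have hpw : s.Pairwise (· ≤ ·) := PySem.List.sorted_pairwise objects (fun x => x)
  obtain ⟨o, ho, hco⟩ := List.mem_flatMap.mp hc
  have hos : o ∈ s := (PySem.List.mem_sorted objects (fun x => x) false o).mpr ho
  obtain ⟨j, hj, hoj⟩ := List.getElem_of_mem hos
  simp only [List.mem_cons, List.not_mem_nil, or_false] at hco
  have hcr1 : c - radius ≤ o := by rcases hco with rfl | rfl | rfl <;> omega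
  have hcr2 : o ≤ c + radius := by rcases hco with rfl | rfl | rfl <;> omega
  obtain ⟨hleL, hltL, hgeL⟩ := PySem.List.bisectLeft_spec s (c - radius) hpw
  obtain ⟨hleR, hltR, hgeR⟩ := PySem.List.bisectRight_spec s (c + radius) hpw
  have h1 : PySem.List.bisectLeft s (c - radius) ≤ j := by
    by_contra hcon
    have := hltL j hj (by omega)
    omega
  have h2 : j < PySem.List.bisectRight s (c + radius) := by
    by_contra hcon
    have := hgeR j hj (by omega)
    omega
  unfold cnt
  omega

theorem main_eq (objects : List Int) (radius : Int) (hpre : objects = [] ∨ 0 ≤ radius) :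
    solution objects radius = solution_alt objects radius := by
  cases objects with
  | nil => rfl
  | cons a t =>
    have hr : 0 ≤ radius := by
      rcases hpre with h | h
      · exact absurd h (by simp)
      · exact h
    set s := PySem.List.sorted (a :: t) (fun x => x) false with hs
    have hpwS : s.Pairwise (· ≤ ·) := PySem.List.sorted_pairwise _ _
    set candsA := s.flatMap (fun o => [o - radius, o, o + radius]) with hcA
    set candsB := PySem.List.sorted ((a :: t).flatMap (fun o => [o - radius, o, o + radius]))
      (fun x => x) false with hcB
    have hpwB : candsB.Pairwise (· ≤ ·) := PySem.List.sorted_pairwise _ _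
    have hpermS : s.Perm (a :: t) := PySem.List.sorted_perm _ _ _
    have hpermC : candsB.Perm candsA :=
      (PySem.List.sorted_perm _ _ _).trans
        (hpermS.symm.flatMap (fun _ _ => List.Perm.refl _))
    have hcntA : ∀ c ∈ candsA, 1 ≤ cnt s radius c := by
      intro c hcc
      apply cnt_pos (a :: t) radius hr
      obtain ⟨o, ho, hco⟩ := List.mem_flatMap.mp hcc
      exact List.mem_flatMap.mpr ⟨o, hpermS.mem_iff.mp ho, hco⟩
    have hcntB : ∀ c ∈ candsB, 1 ≤ cnt s radius c :=
      fun c hcc => hcntA c (hpermC.mem_iff.mp hcc)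
    have hA : solution (a :: t) radius
        = (candsA.foldl (stepA s radius) ((0 : Int), (none : Option Int))).2 := by
      rw [hcA, List.foldl_flatMap]
      rfl
    have hBfold : solution_alt (a :: t) radius
        = ((candsB.foldl (fun st c =>
            let lo := advanceLo s (c - radius) st.1.1
            let hi := advanceHi s (c + radius) st.1.2
            let count : Int := (hi : Int) - (lo : Int)
            ((lo, hi), if count > st.2.1 then (count, some c) else st.2))
          ((0, 0), ((0 : Int), (none : Option Int)))).2).2 := rfl
    have hsweep := sweep_eq s radius hpwS candsB hpwB 0 0 ((0 : Int), (none : Option Int))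
      (fun c _ => ⟨Nat.zero_le _, Nat.zero_le _⟩)
    have hB2 : solution_alt (a :: t) radius
        = (candsB.foldl (stepP s radius) ((0 : Int), (none : Option Int))).2 :=
      hBfold.trans (congrArg Prod.snd hsweep)
    have hMxBA : Mx s radius candsB = Mx s radius candsA := mx_perm s radius hpermC
    rw [hA, charA s radius candsA hcntA, hB2, charB s radius candsB hcntB]
    show (candsA.filter (fun c => decide (cnt s radius c = Mx s radius candsA))).min?
        = (candsB.filter (fun c => decide (cnt s radius c = Mx s radius candsB))).head?
    rw [head?_eq_min? (hpwB.filter _), hMxBA]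
    exact (min?_perm (hpermC.filter _)).symm

-- ===== VERDICT (by name: the statement is the Claim_ definition above) =====
theorem solution_spec : Claim_equal_solution := by
  intro objects radius _ hpre
  unfold Spec_solution
  unfold Pre_solution at hpre
  exact main_eq objects radius hpre
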